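-- pv_equiv track=rewrite | github.com/ljm0850/algo-problem | baekjoon/1590 캠프가는 영식.py | solution
-- ===== SOURCE A (Python) =====
-- def solution(T:int,arr:list[int]):
--     arr.sort()
--     if arr[-1] < T:
--         return -1
--
--     L = len(arr)
--     s,e = 0,L-1
--     while s<e:
--         m = (s+e)//2
--         if arr[m] == T:
--             return 0
--         elif arr[m] <T:
--             s = m+1
--         else:
--             e = m
--     return arr[e]-T
-- ===== SOURCE B (Python) =====
-- def solution(T: int, arr: list[int]):
--     best = -1
--     for x in arr:
--         if x >= T and (best == -1 or x - T < best):
--             best = x - T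
--     return best
-- ===== Notes on version B (the rewrite author's own statement) =====
-- stated objective: faster
-- what changed: Replaced sort + binary search with a single linear pass that tracks the minimum (element - T) over elements >= T; B also does not mutate the input list.
import Mathlib
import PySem

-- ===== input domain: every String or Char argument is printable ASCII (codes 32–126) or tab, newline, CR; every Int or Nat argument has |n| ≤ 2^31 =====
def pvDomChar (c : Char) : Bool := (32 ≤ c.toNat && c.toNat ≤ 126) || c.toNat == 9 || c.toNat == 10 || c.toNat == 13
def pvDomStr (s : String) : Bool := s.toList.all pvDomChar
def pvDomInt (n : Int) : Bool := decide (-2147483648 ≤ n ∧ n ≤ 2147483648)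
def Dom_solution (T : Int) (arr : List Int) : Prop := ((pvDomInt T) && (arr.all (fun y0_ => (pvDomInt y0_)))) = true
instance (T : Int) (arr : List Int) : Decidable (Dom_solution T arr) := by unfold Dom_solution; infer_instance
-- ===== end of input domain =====

-- B replaces A's sort + binary search by one linear pass tracking the minimum (element - T) over
-- elements ≥ T (measured faster). A sorts its argument in place; B does not mutate it — the
-- equivalence proved here is about the RETURN value only.


-- ===== PORT A =====
-- the while loop; s, e are list indices, nonnegative throughout, so Nat with Nat division
-- '(s+e)/2' is exactly Python's '(s+e)//2' here
def solLoop (l : List Int) (T : Int) (s e : Nat) : Int :=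
  if s < e then
    let m := (s + e) / 2
    let v := PySem.List.pyGetD l (m : Int) 0   -- arr[m]; m is always in range when s ≤ e < len
    if v = T then 0
    else if v < T then solLoop l T (m + 1) e
    else solLoop l T s m
  else PySem.List.pyGetD l (e : Int) 0 - T     -- return arr[e] - T
termination_by e - s
decreasing_by all_goals omega

-- after 'arr.sort()' every later use of arr is the sorted list
def solution (T : Int) (arr : List Int) : Int :=
  match PySem.List.pyGet? (PySem.List.sorted arr (fun x => x) false) (-1) with  -- arr[-1]; none = IndexError, excluded by Pre_
  | none => -1
  | some last =>
    if last < T then -1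
    else solLoop (PySem.List.sorted arr (fun x => x) false) T 0
           ((PySem.List.sorted arr (fun x => x) false).length - 1)

-- ===== PORT B =====
def bStep (T : Int) (best x : Int) : Int :=
  if T ≤ x ∧ (best = -1 ∨ x - T < best) then x - T else best

def solution_alt (T : Int) (arr : List Int) : Int :=
  arr.foldl (bStep T) (-1)

-- ===== PRECONDITION & SPEC =====
-- Pre_ excludes only the empty list, on which A raises IndexError at arr[-1].
def Pre_solution (T : Int) (arr : List Int) : Prop := arr ≠ []
instance (T : Int) (arr : List Int) : Decidable (Pre_solution T arr) := by unfold Pre_solution; infer_instance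
def pvWitness_solution : Int × List Int := (3, [5, 1, 7])

def Spec_solution (T : Int) (arr : List Int) (out : Int) : Prop := out = solution_alt T arr
instance (T : Int) (arr : List Int) (out : Int) : Decidable (Spec_solution T arr out) := by unfold Spec_solution; infer_instance

-- ===== CLAIM (what is proved, stated in full; the proofs are below) =====
def Claim_equal_solution : Prop := ∀ (T : Int) (arr : List Int), Dom_solution T arr → Pre_solution T arr → Spec_solution T arr (solution T arr)

-- ===== LEMMAS AND PROOFS =====

-- the common characterisation of both programs' result: -1 if no element reaches T,
-- otherwise m - T for the minimal element m ≥ T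
def IsAns (T : Int) (xs : List Int) (out : Int) : Prop :=
  (out = -1 ∧ ∀ x ∈ xs, x < T) ∨
  (∃ m, m ∈ xs ∧ T ≤ m ∧ out = m - T ∧ ∀ x ∈ xs, T ≤ x → m ≤ x)

theorem isAns_unique {T : Int} {xs : List Int} {o₁ o₂ : Int}
    (h₁ : IsAns T xs o₁) (h₂ : IsAns T xs o₂) : o₁ = o₂ := by
  rcases h₁ with ⟨rfl, hall₁⟩ | ⟨m₁, hm₁, hT₁, rfl, hmin₁⟩ <;>
    rcases h₂ with ⟨rfl, hall₂⟩ | ⟨m₂, hm₂, hT₂, rfl, hmin₂⟩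
  · rfl
  · exact absurd hT₂ (not_le.mpr (hall₁ _ hm₂))
  · exact absurd hT₁ (not_le.mpr (hall₂ _ hm₁))
  · have := hmin₁ _ hm₂ hT₂
    have := hmin₂ _ hm₁ hT₁
    omega

theorem isAns_perm {T : Int} {xs ys : List Int} (hp : xs.Perm ys) {o : Int}
    (h : IsAns T xs o) : IsAns T ys o := by
  rcases h with ⟨rfl, hall⟩ | ⟨m, hm, hT, rfl, hmin⟩
  · exact Or.inl ⟨rfl, fun x hx => hall x (hp.mem_iff.mpr hx)⟩
  · exact Or.inr ⟨m, hp.mem_iff.mp hm, hT, rfl, fun x hx => hmin x (hp.mem_iff.mpr hx)⟩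

theorem bStep_isAns {T : Int} {seen : List Int} {acc : Int} (h : IsAns T seen acc) (x : Int) :
    IsAns T (seen ++ [x]) (bStep T acc x) := by
  rcases h with ⟨rfl, hall⟩ | ⟨m, hm, hT, rfl, hmin⟩
  · unfold bStep
    by_cases hx : T ≤ x
    · rw [if_pos ⟨hx, Or.inl rfl⟩]
      refine Or.inr ⟨x, by simp, hx, rfl, ?_⟩
      intro y hy hTy
      rcases List.mem_append.mp hy with h | h
      · exact absurd hTy (not_le.mpr (hall _ h))
      · simp only [List.mem_singleton] at h; omega
    · rw [if_neg (by tauto)]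
      refine Or.inl ⟨rfl, ?_⟩
      intro y hy
      rcases List.mem_append.mp hy with h | h
      · exact hall _ h
      · simp only [List.mem_singleton] at h; omega
  · unfold bStep
    by_cases hx : T ≤ x
    · by_cases hlt : x - T < m - T
      · rw [if_pos ⟨hx, Or.inr hlt⟩]
        refine Or.inr ⟨x, by simp, hx, rfl, ?_⟩
        intro y hy hTy
        rcases List.mem_append.mp hy with h | h
        · have := hmin _ h hTy; omega
        · simp only [List.mem_singleton] at h; omega
      · rw [if_neg (by intro ⟨_, h⟩; rcases h with h | h <;> omega)]
        refine Or.inr ⟨m, List.mem_append.mpr (Or.inl hm), hT, rfl, ?_⟩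
        intro y hy hTy
        rcases List.mem_append.mp hy with h | h
        · exact hmin _ h hTy
        · simp only [List.mem_singleton] at h; omega
    · rw [if_neg (by tauto)]
      refine Or.inr ⟨m, List.mem_append.mpr (Or.inl hm), hT, rfl, ?_⟩
      intro y hy hTy
      rcases List.mem_append.mp hy with h | h
      · exact hmin _ h hTy
      · simp only [List.mem_singleton] at h; omega

theorem foldB_isAns (T : Int) : ∀ (xs seen : List Int) (acc : Int),
    IsAns T seen acc → IsAns T (seen ++ xs) (xs.foldl (bStep T) acc) := by
  intro xs
  induction xs with
  | nil => intro seen acc h; simpa using h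
  | cons x xs ih =>
      intro seen acc h
      have := ih (seen ++ [x]) (bStep T acc x) (bStep_isAns h x)
      simpa [List.foldl_cons, List.append_assoc] using this

theorem alt_isAns (T : Int) (arr : List Int) : IsAns T arr (solution_alt T arr) := by
  have := foldB_isAns T arr [] (-1) (Or.inl ⟨rfl, by simp⟩)
  simpa [solution_alt] using this

-- sorted-list index monotonicity
theorem sorted_getElem_le {l : List Int} (hs : l.Pairwise (· ≤ ·)) {i j : Nat}
    (hij : i ≤ j) (hj : j < l.length) : l[i]'(by omega) ≤ l[j] := by
  rcases Nat.lt_or_ge i j with h | h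
  · exact (List.pairwise_iff_getElem.mp hs) i j (by omega) hj h
  · have : i = j := by omega
    subst (by omega : i = j); exact le_refl _

theorem getD_in_range {l : List Int} {k : Nat} (hk : k < l.length) :
    PySem.List.pyGetD l (k : Int) 0 = l[k] := by
  rw [PySem.List.pyGetD_natCast]
  exact List.getD_eq_getElem l 0 hk

theorem loop_isAns (l : List Int) (T : Int) (hs : l.Pairwise (· ≤ ·)) :
    ∀ (n s e : Nat), e - s ≤ n → s ≤ e → ∀ (he : e < l.length), T ≤ l[e] →
    (∀ i (hi : i < s) (hl : i < l.length), l[i] < T) →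
    IsAns T l (solLoop l T s e) := by
  intro n
  induction n with
  | zero =>
      intro s e hn hse he hTe hpre
      rw [solLoop, if_neg (by omega), getD_in_range he]
      refine Or.inr ⟨l[e], List.getElem_mem _, hTe, rfl, ?_⟩
      intro y hy hTy
      obtain ⟨i, hi, rfl⟩ := List.mem_iff_getElem.mp hy
      rcases Nat.lt_or_ge i e with h | h
      · exact absurd (hpre i (by omega) hi) (not_lt.mpr hTy)
      · exact sorted_getElem_le hs h hi
  | succ n ih =>
      intro s e hn hse he hTe hpre
      by_cases hlt : s < e
      · rw [solLoop, if_pos hlt]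
        have hm : (s + e) / 2 < l.length := by omega
        simp only [getD_in_range hm]
        by_cases heq : l[(s + e) / 2] = T
        · rw [if_pos heq]
          refine Or.inr ⟨l[(s + e) / 2], List.getElem_mem _, le_of_eq heq.symm, by omega, ?_⟩
          intro y hy hTy; omega
        · rw [if_neg heq]
          by_cases hltT : l[(s + e) / 2] < T
          · rw [if_pos hltT]
            refine ih ((s + e) / 2 + 1) e (by omega) (by omega) he hTe ?_
            intro i hi hl
            rcases Nat.lt_or_ge i s with h | h
            · exact hpre i h hl
            · exact lt_of_le_of_lt (sorted_getElem_le hs (by omega) hm) hltT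
          · rw [if_neg hltT]
            exact ih s ((s + e) / 2) (by omega) (by omega) hm (by omega) hpre
      · rw [solLoop, if_neg hlt, getD_in_range he]
        refine Or.inr ⟨l[e], List.getElem_mem _, hTe, rfl, ?_⟩
        intro y hy hTy
        obtain ⟨i, hi, rfl⟩ := List.mem_iff_getElem.mp hy
        rcases Nat.lt_or_ge i e with h | h
        · exact absurd (hpre i (by omega) hi) (not_lt.mpr hTy)
        · exact sorted_getElem_le hs h hi

theorem a_isAns (T : Int) (arr : List Int) (hne : arr ≠ []) : IsAns T arr (solution T arr) := by
  refine isAns_perm (PySem.List.sorted_perm arr (fun x => x) false) ?_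
  unfold solution
  set l := PySem.List.sorted arr (fun x => x) false with hl
  have hperm : l.Perm arr := PySem.List.sorted_perm arr (fun x => x) false
  have hpw : l.Pairwise (· ≤ ·) := by
    have := PySem.List.sorted_pairwise arr (fun x => x)
    simpa [← hl] using this
  have hlne : l ≠ [] := by
    intro h
    rw [h] at hperm
    exact hne hperm.symm.eq_nil
  have hlast : PySem.List.pyGet? l (-1) = some (l.getLast hlne) := by
    rw [PySem.List.pyGet?_neg_one, List.getLast?_eq_getLast_of_ne_nil hlne]
  have hlen : 0 < l.length := List.length_pos_iff.mpr hlne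
  have hlastElem : l.getLast hlne = l[l.length - 1]'(by omega) := List.getLast_eq_getElem hlne
  rw [hlast]
  show IsAns T l (if l.getLast hlne < T then (-1 : Int) else solLoop l T 0 (l.length - 1))
  by_cases hlt : l.getLast hlne < T
  · rw [if_pos hlt]
    refine Or.inl ⟨rfl, ?_⟩
    intro y hy
    obtain ⟨i, hi, rfl⟩ := List.mem_iff_getElem.mp hy
    calc l[i] ≤ l[l.length - 1]'(by omega) := sorted_getElem_le hpw (by omega) (by omega)
      _ < T := by rw [← hlastElem]; exact hlt
  · rw [if_neg hlt]
    refine loop_isAns l T hpw (l.length - 1) 0 (l.length - 1) (le_refl _) (by omega) (by omega) ?_ (by omega)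
    rw [← hlastElem]; omega

-- ===== VERDICT (by name: the statement is the Claim_ definition above) =====
theorem solution_spec : Claim_equal_solution := by
  intro T arr _ hpre
  exact isAns_unique (a_isAns T arr hpre) (alt_isAns T arr)
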